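-- pv_equiv track=rewrite | github.com/sshar178/Training | email.py | howmany
-- ===== SOURCE A (Python) =====
-- def howmany(unique, domains):
--     lenu = len(unique)
--     lend = len(domains)
--     count = [0] * lend
--     for x in range(lenu):
--         for y in range(lend):
--             if domains[y] in unique[x]:
--                 count[y] +=1
--     return count
-- ===== SOURCE B (Python) =====
-- def howmany(unique, domains):
--     # Substring index: count, for every distinct substring of every string,
--     # how many strings contain it; each answer is then a single dict lookup.
--     counter = {}
--     for s in unique:
--         n = len(s)
--         subs = {s[i:j] for i in range(n + 1) for j in range(i, n + 1)}
--         for t in subs: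
--             counter[t] = counter.get(t, 0) + 1
--     return [counter.get(d, 0) for d in domains]
-- ===== Notes on version B (the rewrite author's own statement) =====
-- stated objective: faster
-- what changed: B builds a substring index once - a counter over the set of all distinct substrings of each string - and answers every domain by a single dictionary lookup, so no per-domain containment scan over the strings remains.
import Mathlib
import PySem

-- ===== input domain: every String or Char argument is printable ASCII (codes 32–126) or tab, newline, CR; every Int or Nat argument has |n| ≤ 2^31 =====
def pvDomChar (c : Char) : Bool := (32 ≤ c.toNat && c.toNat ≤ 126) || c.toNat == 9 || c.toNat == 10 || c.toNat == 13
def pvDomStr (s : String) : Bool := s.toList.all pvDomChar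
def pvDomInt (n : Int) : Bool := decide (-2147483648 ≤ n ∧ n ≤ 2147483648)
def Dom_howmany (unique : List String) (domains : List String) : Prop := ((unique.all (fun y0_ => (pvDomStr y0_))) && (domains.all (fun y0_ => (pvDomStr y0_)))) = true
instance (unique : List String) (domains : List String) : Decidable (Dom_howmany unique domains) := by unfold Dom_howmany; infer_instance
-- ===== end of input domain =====

-- B replaces the per-(string,domain) containment tests with a substring index: a counter
-- over the distinct substrings of each string, then one dict lookup per domain
-- (objective: faster, measured; values proved equal).

-- ===== PORT A =====
def howmany (unique : List String) (domains : List String) : List Int :=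
  let lenu : Int := unique.length
  let lend : Int := domains.length
  let count : List Int := List.replicate domains.length (0 : Int)
  (PySem.List.pyRange 0 lenu 1).foldl (fun c x =>
    (PySem.List.pyRange 0 lend 1).foldl (fun c2 y =>
      if PySem.Str.isIn (PySem.List.pyGetD domains y "") (PySem.List.pyGetD unique x "") then
        PySem.List.pySetD c2 y (PySem.List.pyGetD c2 y 0 + 1)
      else c2) c) count

-- ===== PORT B =====
-- the set {s[i:j] for i in range(n+1) for j in range(i, n+1)}  (keys kept as List Char)
def subsOf (s : String) : PySem.Set (List Char) :=
  let n : Int := s.toList.length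
  PySem.Set.ofList
    ((PySem.List.pyRange 0 (n + 1) 1).flatMap (fun i =>
      (PySem.List.pyRange i (n + 1) 1).map (fun j =>
        PySem.List.slice s.toList (some i) (some j))))

def howmany_alt (unique : List String) (domains : List String) : List Int :=
  let counter : PySem.Dict (List Char) Int :=
    unique.foldl (fun cnt s =>
      (subsOf s).foldl (fun d t => d.modify t 0 (· + 1)) cnt) PySem.Dict.empty
  domains.map (fun d => counter.getD d.toList 0)

-- ===== PRECONDITION & SPEC =====
def Spec_howmany (unique : List String) (domains : List String) (out : List Int) : Prop := out = howmany_alt unique domains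
instance (unique : List String) (domains : List String) (out : List Int) : Decidable (Spec_howmany unique domains out) := by unfold Spec_howmany; infer_instance

-- ===== CLAIM (what is proved, stated in full; the proofs are below) =====
def Claim_equal_howmany : Prop := ∀ (unique : List String) (domains : List String), Dom_howmany unique domains → Spec_howmany unique domains (howmany unique domains)

-- ===== LEMMAS AND PROOFS =====

-- the common mathematical value: for each domain, how many strings contain it
def pvF (unique : List String) (d : String) : Int :=
  (unique.countP (fun s => PySem.Str.isIn d s) : Int)

-- A's inner loop (over the first b domain indices), as a named function
def innerStep (domains : List String) (s : String) (b : Nat) (c : List Int) : List Int :=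
  (PySem.List.pyRange 0 (b : Int) 1).foldl (fun c2 y =>
      if PySem.Str.isIn (PySem.List.pyGetD domains y "") s then
        PySem.List.pySetD c2 y (PySem.List.pyGetD c2 y 0 + 1)
      else c2) c

theorem getD_set_eq (l : List Int) (b k : Nat) (v : Int) (hb : b < l.length) :
    (l.set b v).getD k 0 = if k = b then v else l.getD k 0 := by
  simp only [List.getD, List.getElem?_set]
  by_cases h : k = b
  · subst h; simp [hb]
  · have h' : ¬ b = k := fun h' => h h'.symm
    simp [h, h']

theorem innerStep_length (domains : List String) (s : String) (b : Nat) (c : List Int) :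
    (innerStep domains s b c).length = c.length := by
  unfold innerStep
  generalize PySem.List.pyRange 0 (b : Int) 1 = l
  induction l generalizing c with
  | nil => rfl
  | cons y l ih =>
    simp only [List.foldl_cons]
    rw [ih]
    split_ifs
    · exact PySem.List.length_pySetD ..
    · rfl

theorem innerStep_succ (domains : List String) (s : String) (b : Nat) (c : List Int) :
    innerStep domains s (b + 1) c =
      (fun c2 y =>
        if PySem.Str.isIn (PySem.List.pyGetD domains y "") s then
          PySem.List.pySetD c2 y (PySem.List.pyGetD c2 y 0 + 1)
        else c2) (innerStep domains s b c) (b : Int) := by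
  unfold innerStep
  have : ((b + 1 : Nat) : Int) = (b : Int) + 1 := by push_cast; ring
  rw [this, PySem.List.pyRange_one_succ_right (by positivity), List.foldl_append]
  rfl

theorem innerStep_getD (domains : List String) (s : String) (b : Nat) (c : List Int)
    (hb : b ≤ c.length) (k : Nat) :
    (innerStep domains s b c).getD k 0 =
      if k < b ∧ PySem.Str.isIn (domains.getD k "") s = true then c.getD k 0 + 1 else c.getD k 0 := by
  induction b with
  | zero => simp [innerStep, PySem.List.pyRange]
  | succ b ih =>
    have hb' : b ≤ c.length := by omega
    rw [innerStep_succ]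
    simp only [PySem.List.pyGetD_natCast, PySem.List.pySetD_natCast]
    by_cases hin : PySem.Str.isIn (domains.getD b "") s = true
    · rw [if_pos hin]
      have hlen : b < (innerStep domains s b c).length := by rw [innerStep_length]; omega
      rw [getD_set_eq _ _ _ _ hlen]
      by_cases hk : k = b
      · subst hk
        rw [if_pos rfl, ih hb', if_neg (by omega), if_pos ⟨by omega, hin⟩]
      · rw [if_neg hk, ih hb']
        have hiff : (k < b + 1 ∧ PySem.Str.isIn (domains.getD k "") s = true) ↔
            (k < b ∧ PySem.Str.isIn (domains.getD k "") s = true) := by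
          constructor <;> rintro ⟨h1, h2⟩ <;> exact ⟨by omega, h2⟩
        rw [if_congr hiff rfl rfl]
    · rw [if_neg hin, ih hb']
      have hiff : (k < b + 1 ∧ PySem.Str.isIn (domains.getD k "") s = true) ↔
          (k < b ∧ PySem.Str.isIn (domains.getD k "") s = true) := by
        constructor <;> rintro ⟨h1, h2⟩
        · refine ⟨?_, h2⟩
          rcases Nat.lt_succ_iff_lt_or_eq.mp h1 with h | h
          · exact h
          · subst h; exact absurd h2 hin
        · exact ⟨by omega, h2⟩
      rw [if_congr hiff rfl rfl]

theorem outer_getD (domains : List String) (xs : List String) :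
    ∀ (c : List Int), c.length = domains.length → ∀ k : Nat, k < domains.length →
    (xs.foldl (fun c s => innerStep domains s domains.length c) c).getD k 0 =
      c.getD k 0 + (xs.countP (fun s => PySem.Str.isIn (domains.getD k "") s) : Int) := by
  induction xs with
  | nil => intro c _ k _; simp
  | cons s xs ih =>
    intro c hc k hk
    simp only [List.foldl_cons]
    rw [ih _ (by rw [innerStep_length]; exact hc) k hk,
        innerStep_getD domains s domains.length c (le_of_eq hc.symm) k,
        List.countP_cons]
    by_cases hin : PySem.Str.isIn (domains.getD k "") s = true
    · rw [if_pos ⟨hk, hin⟩]; simp only [hin, if_true]; push_cast; ring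
    · rw [if_neg (by tauto)]
      simp only [Bool.not_eq_true] at hin
      simp only [hin, Bool.false_eq_true, if_false]
      push_cast; ring

theorem outer_length (domains : List String) (xs : List String) (c : List Int) :
    (xs.foldl (fun c s => innerStep domains s domains.length c) c).length = c.length := by
  induction xs generalizing c with
  | nil => rfl
  | cons s xs ih => simp only [List.foldl_cons]; rw [ih, innerStep_length]

theorem howmany_eq_fold (unique domains : List String) :
    howmany unique domains =
      unique.foldl (fun c s => innerStep domains s domains.length c)
        (List.replicate domains.length (0 : Int)) := by
  unfold howmany innerStep
  dsimp only
  exact PySem.List.foldl_pyRange_zero_pyGetD' unique ""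
    (fun c s => (PySem.List.pyRange 0 (domains.length : Int) 1).foldl (fun c2 y =>
      if PySem.Str.isIn (PySem.List.pyGetD domains y "") s then
        PySem.List.pySetD c2 y (PySem.List.pyGetD c2 y 0 + 1)
      else c2) c)
    (List.replicate domains.length (0 : Int))

-- A equals domains.map (pvF unique)
theorem a_eq_map (unique domains : List String) :
    howmany unique domains = domains.map (pvF unique) := by
  rw [howmany_eq_fold]
  apply List.ext_getElem
  · rw [outer_length, List.length_replicate, List.length_map]
  · intro k hk1 hk2
    have hkd : k < domains.length := by rwa [List.length_map] at hk2
    have h1 : (unique.foldl (fun c s => innerStep domains s domains.length c)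
        (List.replicate domains.length (0 : Int))).getD k 0 =
        0 + (unique.countP (fun s => PySem.Str.isIn (domains.getD k "") s) : Int) := by
      rw [outer_getD domains unique _ (List.length_replicate) k hkd]
      congr 1
      simp [List.getD]
    rw [← List.getD_eq_getElem _ 0 hk1, h1, List.getElem_map]
    rw [show domains.getD k "" = domains[k] from List.getD_eq_getElem _ "" hkd]
    simp [pvF]

-- B-side: membership in the substring set is exactly Python's 'in'
theorem nodup_subsOf (s : String) : (subsOf s).Nodup := by
  unfold subsOf; exact PySem.Set.nodup_ofList _

theorem mem_subsOf (s : String) (t : List Char) :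
    t ∈ subsOf s ↔ PySem.Str.isIn (String.ofList t) s = true := by
  unfold subsOf
  rw [PySem.Set.mem_ofList, PySem.Str.isIn_iff_infix]
  simp only [String.toList_ofList, List.mem_flatMap, List.mem_map,
    PySem.List.mem_pyRange_one]
  constructor
  · rintro ⟨i, ⟨h0, _⟩, j, ⟨hij, _⟩, rfl⟩
    rw [PySem.List.slice_toNat _ h0 (le_trans h0 hij)]
    exact (List.take_prefix _ _).isInfix.trans (List.drop_suffix _ _).isInfix
  · intro h
    rcases h with ⟨u, v, huv⟩
    refine ⟨(u.length : Int), ⟨by positivity, ?_⟩,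
      ((u.length + t.length : Nat) : Int), ⟨by exact_mod_cast Nat.le_add_right _ _, ?_⟩, ?_⟩
    · have : u.length ≤ s.toList.length := by
        rw [← huv]; simp
      exact_mod_cast Nat.lt_succ_of_le this
    · have : u.length + t.length ≤ s.toList.length := by
        rw [← huv]; simp
      exact_mod_cast Nat.lt_succ_of_le this
    · rw [PySem.List.slice_natCast, ← huv]
      simp

-- counter invariant
theorem counter_getD_aux (xs : List String) (t : List Char) :
    ∀ cnt : PySem.Dict (List Char) Int,
    (xs.foldl (fun cnt s => (subsOf s).foldl (fun d t => d.modify t 0 (· + 1)) cnt) cnt).getD t 0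
      = cnt.getD t 0 + (xs.countP (fun s => PySem.Str.isIn (String.ofList t) s) : Int) := by
  induction xs with
  | nil => intro cnt; simp
  | cons s xs ih =>
    intro cnt
    simp only [List.foldl_cons]
    rw [ih, PySem.Dict.getD_foldl_modify_add_one, List.countP_cons]
    by_cases h : PySem.Str.isIn (String.ofList t) s = true
    · rw [List.count_eq_one_of_mem (nodup_subsOf s) ((mem_subsOf s t).mpr h)]
      simp only [h, if_true]
      push_cast; ring
    · rw [List.count_eq_zero.mpr (fun hm => h ((mem_subsOf s t).mp hm))]
      simp only [Bool.not_eq_true] at h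
      simp only [h, Bool.false_eq_true, if_false]
      push_cast; ring

theorem counter_getD (unique : List String) (t : List Char) :
    (unique.foldl (fun cnt s =>
      (subsOf s).foldl (fun d t => d.modify t 0 (· + 1)) cnt) PySem.Dict.empty).getD t 0 =
      (unique.countP (fun s => PySem.Str.isIn (String.ofList t) s) : Int) := by
  rw [counter_getD_aux]
  simp [pysem]

-- B equals domains.map (pvF unique)
theorem alt_eq_map (unique domains : List String) :
    howmany_alt unique domains = domains.map (pvF unique) := by
  unfold howmany_alt
  dsimp only
  apply List.map_congr_left
  intro d _
  rw [counter_getD]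
  simp [pvF]

-- ===== VERDICT (by name: the statement is the Claim_ definition above) =====
theorem howmany_spec : Claim_equal_howmany := by
  intro unique domains _
  unfold Spec_howmany
  rw [a_eq_map, alt_eq_map]
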